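-- pv_equiv track=rewrite | github.com/Oldgram/SINFEDU | LINFO1101/Examen Janvier 2019/[Q2] Occurrences de caractères.py | caracteres_occurrences
-- ===== SOURCE A (Python) =====
-- def caracteres_occurrences(l):
--     dic = {}
--     for index, i in enumerate(l):
--         for k in i:
--             if k in dic.keys():
--                 if index not in dic[k]:
--                     dic[k].append(index)
--             else:
--                 dic[k] = [index]
--     return dic
-- ===== SOURCE B (Python) =====
-- def caracteres_occurrences(l):
--     order = dict.fromkeys(c for s in l for c in s)
--     return {c: [i for i, s in enumerate(l) if c in s] for c in order}
-- ===== Notes on version B (the rewrite author's own statement) =====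
-- stated objective: faster
-- what changed: replaces A's single-pass incremental dict building (which rescans the growing index list on every character occurrence) by two staged passes: an ordered dedup of all characters fixes the key order, then each character's index list is produced independently by filtering the enumerated string list
import Mathlib
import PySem

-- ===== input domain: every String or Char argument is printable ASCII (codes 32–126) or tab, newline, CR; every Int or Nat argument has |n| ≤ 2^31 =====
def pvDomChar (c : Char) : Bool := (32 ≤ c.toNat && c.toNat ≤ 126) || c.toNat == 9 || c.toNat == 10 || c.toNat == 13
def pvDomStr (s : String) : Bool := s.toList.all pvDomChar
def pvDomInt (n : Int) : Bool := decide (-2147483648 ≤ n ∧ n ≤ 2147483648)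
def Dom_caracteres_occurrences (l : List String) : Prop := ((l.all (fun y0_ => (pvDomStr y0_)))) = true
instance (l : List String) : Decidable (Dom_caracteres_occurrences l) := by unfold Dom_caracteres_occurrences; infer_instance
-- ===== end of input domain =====

-- B replaces A's incremental dict building by two staged passes — key order first, then each index list by filtering — avoiding A's per-character scan of the growing index list (measured faster).

-- ===== PORT A =====
def stepA (idx : Int) (d : PySem.Dict String (List Int)) (c : Char) : PySem.Dict String (List Int) :=
  let k := String.singleton c
  if d.contains k then
    if (d.getD k []).contains idx then d
    else d.insert k ((d.getD k []) ++ [idx])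
  else d.insert k [idx]

def caracteres_occurrences (l : List String) : List (String × List Int) :=
  ((PySem.List.enumerate l 0).foldl
    (fun d p => p.2.toList.foldl (stepA p.1) d) PySem.Dict.empty).items

-- ===== PORT B =====
-- [i for i, s in enumerate(l) if c in s]
def idxList (l : List String) (k : String) : List Int :=
  ((PySem.List.enumerate l 0).filter (fun p => PySem.Str.isIn k p.2)).map (·.1)

def caracteres_occurrences_alt (l : List String) : List (String × List Int) :=
  (PySem.List.dedup (l.flatMap (fun s => s.toList.map String.singleton))).map
    (fun k => (k, idxList l k))

-- ===== PRECONDITION & SPEC =====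
def Spec_caracteres_occurrences (l : List String) (out : List (String × List Int)) : Prop := out = caracteres_occurrences_alt l
instance (l : List String) (out : List (String × List Int)) : Decidable (Spec_caracteres_occurrences l out) := by unfold Spec_caracteres_occurrences; infer_instance

-- ===== CLAIM (what is proved, stated in full; the proofs are below) =====
def Claim_equal_caracteres_occurrences : Prop := ∀ (l : List String), Dom_caracteres_occurrences l → Spec_caracteres_occurrences l (caracteres_occurrences l)

-- ===== LEMMAS AND PROOFS =====

-- A's inner step, lifted to the single-character-string key it uses
def kstepA (n : Int) (d : PySem.Dict String (List Int)) (k : String) : PySem.Dict String (List Int) :=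
  if d.contains k then
    if (d.getD k []).contains n then d
    else d.insert k ((d.getD k []) ++ [n])
  else d.insert k [n]

lemma filter_discard (xs : List String) (k : String) (f : String → Bool) (hk : f k = false) :
    (PySem.Set.discard xs k).filter f = xs.filter f := by
  simp only [PySem.Set.discard, List.filter_filter]
  apply List.filter_congr
  intro x _
  by_cases h : x = k
  · subst h; simp [hk]
  · simp [h]

lemma filter_not_or (xs : List String) (k : String) (f : String → Bool) :
    xs.filter (fun x => !(x == k) && f x) = (PySem.Set.discard xs k).filter f := by
  simp only [PySem.Set.discard, List.filter_filter]
  apply List.filter_congr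
  intro x _
  rw [Bool.and_comm]

lemma pair_eta {α β : Type} (p : α × β) : (p.1, p.2) = p := rfl

lemma innerItems (n : Int) (ks : List String) :
    ∀ d : PySem.Dict String (List Int), d.keys.Nodup →
    (ks.foldl (kstepA n) d).items =
      d.items.map (fun p => if ks.contains p.1 && !(p.2.contains n) then (p.1, p.2 ++ [n]) else p)
      ++ ((PySem.Set.ofList ks).filter (fun k => !(d.contains k))).map (fun k => (k, [n])) := by
  induction ks with
  | nil => intro d h; simp [PySem.Set.ofList_nil]
  | cons k ks ih =>
    intro d h
    simp only [List.foldl_cons]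
    by_cases hC : d.contains k
    · by_cases hm : (d.getD k []).contains n
      · have hstep : kstepA n d k = d := by unfold kstepA; rw [if_pos hC, if_pos hm]
        rw [hstep, ih d h]
        congr 1
        · apply List.map_congr_left
          intro p hp
          by_cases hpk : p.1 = k
          · have hpv : p.2.contains n = true := by
              have hmem : (p.1, p.2) ∈ d.items := by rw [pair_eta]; exact hp
              have := PySem.Dict.getD_of_mem_items d hmem h []
              rw [hpk] at this; rw [← this]; exact hm
            have hn : n ∈ p.2 := by simpa using hpv
            simp [hn]
          · simp [hpk]
        · rw [PySem.Set.ofList_cons, List.filter_cons_of_neg (by simp [hC]),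
            filter_discard _ _ _ (by simp [hC])]
      · have hstep : kstepA n d k = d.insert k ((d.getD k []) ++ [n]) := by
          unfold kstepA; rw [if_pos hC, if_neg hm]
        rw [hstep, ih _ (PySem.Dict.nodup_keys_insert _ _ _ h),
          PySem.Dict.items_insert_of_contains d _ hC, List.map_map]
        congr 1
        · apply List.map_congr_left
          intro p hp
          by_cases hpk : p.1 = k
          · obtain ⟨p1, p2⟩ := p
            simp only at hpk
            subst hpk
            have hpv : d.getD p1 [] = p2 :=
              PySem.Dict.getD_of_mem_items d hp h []
            rw [hpv] at hm
            have hn : n ∉ p2 := by simpa using hm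
            simp [hpv, hn]
          · have hbe : (p.1 == k) = false := by simp [hpk]
            simp [Function.comp_apply, hbe, hpk]
        · rw [PySem.Set.ofList_cons, List.filter_cons_of_neg (by simp [hC]),
            filter_discard _ _ _ (by simp [hC])]
          congr 1
          apply List.filter_congr
          intro x hx
          rw [PySem.Dict.contains_insert]
          by_cases hxk : x = k
          · subst hxk; simp [hC]
          · simp [hxk]
    · have hCf : d.contains k = false := Bool.eq_false_iff.mpr hC
      have hstep : kstepA n d k = d.insert k [n] := by unfold kstepA; rw [if_neg hC]
      rw [hstep, ih _ (PySem.Dict.nodup_keys_insert _ _ _ h),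
        PySem.Dict.items_insert_of_not_contains d _ hCf, List.map_append,
        List.map_cons, List.map_nil, if_neg (by simp)]
      rw [PySem.Set.ofList_cons, List.filter_cons_of_pos (by simp [hCf]), List.map_cons,
        List.append_assoc, List.singleton_append]
      congr 1
      · apply List.map_congr_left
        intro p hp
        have hpk : p.1 ≠ k := by
          intro he
          have hmem : p.1 ∈ d.keys := PySem.Dict.mem_keys_of_mem_items d hp
          rw [he] at hmem
          exact hC ((PySem.Dict.contains_iff_mem_keys d k).mpr hmem)
        simp [hpk]
      · congr 1
        rw [← filter_not_or]
        apply congrArg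
        apply List.filter_congr
        intro x hx
        rw [PySem.Dict.contains_insert]
        simp [Bool.not_or]

lemma foldl_stepA_eq (cs : List Char) (n : Int) (d : PySem.Dict String (List Int)) :
    cs.foldl (stepA n) d = (cs.map String.singleton).foldl (kstepA n) d := by
  rw [List.foldl_map]; rfl

lemma kstepA_nodup (n : Int) (d : PySem.Dict String (List Int)) (k : String)
    (h : d.keys.Nodup) : (kstepA n d k).keys.Nodup := by
  unfold kstepA
  split_ifs <;> first | exact h | exact PySem.Dict.nodup_keys_insert _ _ _ h

lemma foldl_kstepA_nodup (ks : List String) (n : Int) :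
    ∀ d : PySem.Dict String (List Int), d.keys.Nodup → (ks.foldl (kstepA n) d).keys.Nodup := by
  induction ks with
  | nil => intro d h; exact h
  | cons k ks ih => intro d h; exact ih _ (kstepA_nodup n d k h)

lemma isIn_singleton (c : Char) (s : String) :
    PySem.Str.isIn (String.singleton c) s = s.toList.contains c := by
  rw [Bool.eq_iff_iff]
  simp [PySem.Chars.isIn_iff_infix, List.singleton_infix_iff]

lemma contains_map_singleton (cs : List Char) (c : Char) :
    (cs.map String.singleton).contains (String.singleton c) = cs.contains c := by
  rw [Bool.eq_iff_iff]
  simp only [List.contains_iff_mem, List.mem_map]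
  constructor
  · rintro ⟨a, ha, he⟩
    have : a = c := by have := congrArg String.toList he; simpa using this
    exact this ▸ ha
  · intro h; exact ⟨c, h, rfl⟩

lemma idxList_not_contains (l : List String) (k : String) :
    (idxList l k).contains (l.length : Int) = false := by
  rw [Bool.eq_false_iff]
  intro hc
  have hx := List.contains_iff_mem.mp hc
  simp only [idxList, List.mem_map, List.mem_filter] at hx
  obtain ⟨p, ⟨hp, _⟩, hfst⟩ := hx
  obtain ⟨j, hj, rfl⟩ := (PySem.List.mem_enumerate_iff _ _ _).mp hp
  simp only [zero_add] at hfst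
  omega

lemma idxList_append (l : List String) (s : String) (k : String) :
    idxList (l ++ [s]) k = idxList l k ++ (if PySem.Str.isIn k s then [(l.length : Int)] else []) := by
  simp only [idxList, PySem.List.enumerate_append, List.filter_append, List.map_append,
    PySem.List.enumerate_cons, PySem.List.enumerate_nil, zero_add]
  congr 1
  by_cases h : PySem.Chars.isIn k.toList s.toList <;> simp [h]

lemma idxList_nil_of_not_mem (l : List String) (c : Char)
    (h : String.singleton c ∉ l.flatMap (fun s => s.toList.map String.singleton)) :
    idxList l (String.singleton c) = [] := by
  simp only [idxList, List.map_eq_nil_iff, List.filter_eq_nil_iff]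
  intro p hp
  have hm : p.2 ∈ l := by
    have h2 := PySem.List.map_snd_enumerate l (0 : Int)
    rw [← h2]
    exact List.mem_map_of_mem hp
  rw [isIn_singleton, Bool.not_eq_true, Bool.eq_false_iff]
  intro hin
  exact h (List.mem_flatMap.mpr ⟨p.2, hm, List.mem_map_of_mem (List.contains_iff_mem.mp hin)⟩)

lemma mem_K_singleton (l : List String) (k : String)
    (h : k ∈ PySem.List.dedup (l.flatMap (fun s => s.toList.map String.singleton))) :
    ∃ c : Char, k = String.singleton c := by
  rw [PySem.List.dedup_eq_ofList, PySem.Set.mem_ofList, List.mem_flatMap] at h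
  obtain ⟨s', _, hk⟩ := h
  obtain ⟨c, _, rfl⟩ := List.mem_map.mp hk
  exact ⟨c, rfl⟩

lemma dict_contains_eq (l : List String) (d : PySem.Dict String (List Int))
    (hd : d.items = caracteres_occurrences_alt l) (x : String) :
    d.contains x =
      (PySem.List.dedup (l.flatMap (fun s => s.toList.map String.singleton))).contains x := by
  rw [PySem.Dict.contains_eq_decide_mem_keys]
  rw [Bool.eq_iff_iff]
  simp only [decide_eq_true_eq, List.contains_iff_mem, PySem.Dict.keys, hd,
    caracteres_occurrences_alt, List.map_map]
  simp

lemma main_items (l : List String) :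
    (((PySem.List.enumerate l 0).foldl
        (fun d p => p.2.toList.foldl (stepA p.1) d) PySem.Dict.empty)).items
      = caracteres_occurrences_alt l ∧
    (((PySem.List.enumerate l 0).foldl
        (fun d p => p.2.toList.foldl (stepA p.1) d) PySem.Dict.empty)).keys.Nodup := by
  induction l using List.reverseRecOn with
  | nil =>
    refine ⟨rfl, ?_⟩
    simp [PySem.List.enumerate_nil]
  | append_singleton l s ih =>
    obtain ⟨ih1, ih2⟩ := ih
    have hfold : (PySem.List.enumerate (l ++ [s]) 0).foldl
        (fun d p => p.2.toList.foldl (stepA p.1) d) PySem.Dict.empty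
        = (s.toList.map String.singleton).foldl (kstepA (l.length : Int))
            ((PySem.List.enumerate l 0).foldl
              (fun d p => p.2.toList.foldl (stepA p.1) d) PySem.Dict.empty) := by
      rw [PySem.List.enumerate_append, List.foldl_append]
      simp only [PySem.List.enumerate_cons, PySem.List.enumerate_nil, List.foldl_cons,
        List.foldl_nil, zero_add]
      rw [foldl_stepA_eq]
    refine ⟨?_, by rw [hfold]; exact foldl_kstepA_nodup _ _ _ ih2⟩
    rw [hfold, innerItems _ _ _ ih2, ih1]
    -- unfold B on the right
    have hKapp : PySem.List.dedup ((l ++ [s]).flatMap (fun s => s.toList.map String.singleton))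
        = PySem.List.dedup (l.flatMap (fun s => s.toList.map String.singleton))
          ++ (PySem.Set.ofList (s.toList.map String.singleton)).filter
              (fun y => !((PySem.List.dedup (l.flatMap (fun s => s.toList.map String.singleton))).contains y)) := by
      rw [List.flatMap_append, PySem.List.dedup_eq_ofList, PySem.Set.ofList_append,
        PySem.Set.update_eq_append_filter, PySem.List.dedup_eq_ofList]
      simp [List.flatMap_cons]
    conv_rhs => rw [caracteres_occurrences_alt, hKapp, List.map_append]
    congr 1
    · -- old keys
      rw [caracteres_occurrences_alt, List.map_map]
      apply List.map_congr_left
      intro k hk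
      obtain ⟨c, rfl⟩ := mem_K_singleton l k hk
      simp only [Function.comp_apply, contains_map_singleton, idxList_not_contains,
        Bool.not_false, Bool.and_true, idxList_append, isIn_singleton]
      by_cases hcs : c ∈ s.toList <;> simp [hcs]
    · -- new keys
      have hfil : (PySem.Set.ofList (s.toList.map String.singleton)).filter
            (fun k => !((PySem.List.enumerate l 0).foldl
              (fun d p => p.2.toList.foldl (stepA p.1) d) PySem.Dict.empty).contains k)
          = (PySem.Set.ofList (s.toList.map String.singleton)).filter
            (fun y => !((PySem.List.dedup (l.flatMap (fun s => s.toList.map String.singleton))).contains y)) := by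
        apply List.filter_congr
        intro x _
        rw [dict_contains_eq l _ ih1 x]
      rw [hfil]
      apply List.map_congr_left
      intro k hk
      have hkm := (List.mem_filter.mp hk)
      have h1 := hkm.1
      rw [PySem.Set.mem_ofList] at h1
      obtain ⟨c, hc, rfl⟩ := List.mem_map.mp h1
      have hnot : String.singleton c ∉ l.flatMap (fun s => s.toList.map String.singleton) := by
        intro hmem
        have := hkm.2
        rw [Bool.not_eq_eq_eq_not, Bool.not_true, Bool.eq_false_iff] at this
        exact this (List.contains_iff_mem.mpr
          (by rw [PySem.List.dedup_eq_ofList, PySem.Set.mem_ofList]; exact hmem))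
      have hcs : s.toList.contains c := List.contains_iff_mem.mpr hc
      rw [idxList_append, idxList_nil_of_not_mem l c hnot, isIn_singleton, if_pos hcs,
        List.nil_append]

-- ===== VERDICT (by name: the statement is the Claim_ definition above) =====
theorem caracteres_occurrences_spec : Claim_equal_caracteres_occurrences := by
  intro l _
  unfold Spec_caracteres_occurrences caracteres_occurrences
  exact (main_items l).1
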